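-- pv_equiv track=rewrite | github.com/laoyouqing/protocol_v2 | changing_protocol/tool/calc.py | high_low
-- ===== SOURCE A (Python) =====
-- import math
--
-- def high_low(data):
--     # 163f2109  == 09213f16
--     isetp = math.ceil(len(data) / 8)
--     repdata = ''
--     for i in range(1, isetp + 1):
--         tmp = data[(i - 1) * 8: 8 * i]
--         low = tmp[2:4] + tmp[0:2]
--         high = tmp[6:] + tmp[4:6]
--         repdata = high + low + repdata
--     return repdata
-- ===== SOURCE B (Python) =====
-- def high_low(data):
--     # Simpler: the net effect of A is reversing the string two characters at a time.
--     pairs = [data[i:i + 2] for i in range(0, len(data), 2)]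
--     return ''.join(reversed(pairs))
-- ===== Notes on version B (the rewrite author's own statement) =====
-- stated objective: faster
-- what changed: Replaces the 8-char chunking with high/low slice reassembly and quadratic string prepending by a single pass that slices the string into 2-char units and joins them in reverse order.
import Mathlib
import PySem

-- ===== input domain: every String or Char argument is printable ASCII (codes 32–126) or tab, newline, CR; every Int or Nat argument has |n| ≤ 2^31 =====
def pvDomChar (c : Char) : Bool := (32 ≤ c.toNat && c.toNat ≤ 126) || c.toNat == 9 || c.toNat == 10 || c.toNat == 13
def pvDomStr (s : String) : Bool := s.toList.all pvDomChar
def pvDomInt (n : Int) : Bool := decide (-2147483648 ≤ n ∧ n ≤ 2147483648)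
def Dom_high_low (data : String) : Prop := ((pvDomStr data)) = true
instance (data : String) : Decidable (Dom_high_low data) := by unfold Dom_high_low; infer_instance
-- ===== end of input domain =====

-- B replaces A's 8-char chunking + high/low slice reassembly + repeated string prepending
-- by a single pass over 2-char slices joined in reverse order (objective: simpler).


-- ===== PORT A =====
def high_low (data : String) : String :=
  let l := data.toList
  -- math.ceil(len(data) / 8): exact as floor((len + 7) / 8) since len ≥ 0
  let isetp : Int := PySem.Int.floordiv ((l.length : Int) + 7) 8
  let repdata := (PySem.List.pyRange 1 (isetp + 1) 1).foldl
    (fun repdata i =>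
      let tmp := PySem.List.slice l (some ((i - 1) * 8)) (some (8 * i))
      let low := PySem.List.slice tmp (some 2) (some 4) ++ PySem.List.slice tmp (some 0) (some 2)
      let high := PySem.List.slice tmp (some 6) none ++ PySem.List.slice tmp (some 4) (some 6)
      high ++ low ++ repdata) []
  String.ofList repdata

-- ===== PORT B =====
def high_low_alt (data : String) : String :=
  let l := data.toList
  let pairs := (PySem.List.pyRange 0 (l.length : Int) 2).map
    (fun i => PySem.List.slice l (some i) (some (i + 2)))
  String.ofList pairs.reverse.flatten

-- ===== PRECONDITION & SPEC =====
def Spec_high_low (data : String) (out : String) : Prop := out = high_low_alt data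
instance (data : String) (out : String) : Decidable (Spec_high_low data out) := by unfold Spec_high_low; infer_instance

-- ===== CLAIM (what is proved, stated in full; the proofs are below) =====
def Claim_equal_high_low : Prop := ∀ (data : String), Dom_high_low data → Spec_high_low data (high_low data)

-- ===== LEMMAS AND PROOFS =====

/-- The common characterisation: the string reversed two characters at a time. -/
def pairRev : List Char → List Char
  | [] => []
  | [a] => [a]
  | a :: b :: r => pairRev r ++ [a, b]

theorem pairRev_step (l : List Char) : pairRev l = pairRev (l.drop 2) ++ l.take 2 := by
  match l with
  | [] => rfl
  | [a] => rfl
  | a :: b :: r => rfl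

theorem pairRev_append_even (a b : List Char) (h : a.length % 2 = 0) :
    pairRev (a ++ b) = pairRev b ++ pairRev a := by
  induction a using pairRev.induct with
  | case1 => simp [pairRev]
  | case2 x => simp at h
  | case3 x y r ih =>
    have h' : r.length % 2 = 0 := by simp at h; omega
    simp only [List.cons_append, pairRev, ih h', List.append_assoc]

-- numeral-friendly forms of the slice lemmas used by the ports
theorem slice_nn (xs : List Char) (a b : Nat) :
    PySem.List.slice xs (some (a : Int)) (some ((a : Int) + (b : Int))) = (xs.drop a).take b :=
  PySem.List.slice_natCast_add xs a b

theorem slice26 (xs : List Char) : PySem.List.slice xs (some 2) (some 4) = (xs.drop 2).take 2 := by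
  simpa using PySem.List.slice_natCast xs 2 4

theorem slice02 (xs : List Char) : PySem.List.slice xs (some 0) (some 2) = xs.take 2 := by
  simpa using PySem.List.slice_natCast xs 0 2

theorem slice46 (xs : List Char) : PySem.List.slice xs (some 4) (some 6) = (xs.drop 4).take 2 := by
  simpa using PySem.List.slice_natCast xs 4 6

theorem slice6none (xs : List Char) : PySem.List.slice xs (some 6) none = xs.drop 6 := by
  simpa using PySem.List.slice_from_natCast xs 6

/-- A's per-chunk reassembly is `pairRev` on chunks of at most 8 characters. -/
theorem chunk_eq_pairRev (tmp : List Char) (h : tmp.length ≤ 8) :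
    tmp.drop 6 ++ (tmp.drop 4).take 2 ++ ((tmp.drop 2).take 2 ++ tmp.take 2) = pairRev tmp := by
  have h8 : tmp.drop 8 = [] := List.drop_eq_nil_iff.mpr h
  have h6 : (tmp.drop 6).take 2 = tmp.drop 6 :=
    List.take_of_length_le (by simp; omega)
  rw [pairRev_step tmp, pairRev_step (tmp.drop 2), pairRev_step ((tmp.drop 2).drop 2),
      pairRev_step (((tmp.drop 2).drop 2).drop 2)]
  simp only [List.drop_drop]
  norm_num
  rw [h8, h6]
  simp [pairRev]

/-- Invariant of A's loop: after the first `k` iterations, `repdata` is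
    `pairRev` of the first `8*k` characters. -/
theorem A_loop (l : List Char) (k : Nat) :
    (PySem.List.pyRange 1 ((k : Int) + 1) 1).foldl
      (fun repdata i =>
        let tmp := PySem.List.slice l (some ((i - 1) * 8)) (some (8 * i))
        let low := PySem.List.slice tmp (some 2) (some 4) ++ PySem.List.slice tmp (some 0) (some 2)
        let high := PySem.List.slice tmp (some 6) none ++ PySem.List.slice tmp (some 4) (some 6)
        high ++ low ++ repdata) []
      = pairRev (l.take (8 * k)) := by
  induction k with
  | zero => simp [PySem.List.pyRange_one_eq_nil, pairRev]
  | succ k ih =>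
    have hcast : ((k + 1 : Nat) : Int) + 1 = ((k : Int) + 1) + 1 := by push_cast; ring
    rw [hcast, PySem.List.pyRange_one_succ_right (by omega), List.foldl_append, ih]
    simp only [List.foldl_cons, List.foldl_nil]
    have htmp : PySem.List.slice l (some (((k : Int) + 1 - 1) * 8)) (some (8 * ((k : Int) + 1)))
        = (l.drop (8 * k)).take 8 := by
      have : ((k : Int) + 1 - 1) * 8 = ((8 * k : Nat) : Int) := by push_cast; ring
      rw [this]
      have : (8 : Int) * ((k : Int) + 1) = ((8 * k : Nat) : Int) + ((8 : Nat) : Int) := by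
        push_cast; ring
      rw [this, slice_nn]
    rw [htmp, slice26, slice02, slice46, slice6none]
    have hlen : ((l.drop (8 * k)).take 8).length ≤ 8 := by simp
    rw [chunk_eq_pairRev _ hlen]
    by_cases hk : 8 * k ≤ l.length
    · have heven : (l.take (8 * k)).length % 2 = 0 := by
        rw [List.length_take]; omega
      have : l.take (8 * (k + 1)) = l.take (8 * k) ++ (l.drop (8 * k)).take 8 := by
        have : 8 * (k + 1) = 8 * k + 8 := by ring
        rw [this, List.take_add]
      rw [this, pairRev_append_even _ _ heven]
    · have hd : l.drop (8 * k) = [] := List.drop_eq_nil_iff.mpr (by omega)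
      have h1 : l.take (8 * (k + 1)) = l := List.take_of_length_le (by omega)
      have h2 : l.take (8 * k) = l := List.take_of_length_le (by omega)
      rw [hd, h1, h2]
      simp [pairRev]

/-- B computes `pairRev` (over `List.range`, after normalising the step-2 range). -/
theorem B_range (l : List Char) :
    ((List.range ((l.length + 1) / 2)).map (fun k => (l.drop (2 * k)).take 2)).reverse.flatten
      = pairRev l := by
  induction l using pairRev.induct with
  | case1 => simp [pairRev]
  | case2 a => simp [pairRev, List.range_succ]
  | case3 a b r ih =>
    have hm : ((a :: b :: r).length + 1) / 2 = (r.length + 1) / 2 + 1 := by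
      simp; omega
    rw [hm, List.range_succ_eq_map]
    simp only [List.map_cons, List.map_map, List.reverse_cons, List.flatten_append]
    have hfun : ((fun k => ((a :: b :: r).drop (2 * k)).take 2) ∘ Nat.succ)
        = (fun k => (r.drop (2 * k)).take 2) := by
      funext k
      simp only [Function.comp]
      have : 2 * Nat.succ k = 2 * k + 2 := by omega
      rw [this]
      rfl
    rw [hfun, ih]
    simp [pairRev]

theorem B_eq (l : List Char) :
    ((PySem.List.pyRange 0 (l.length : Int) 2).map
        (fun i => PySem.List.slice l (some i) (some (i + 2)))).reverse.flatten
      = pairRev l := by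
  rw [PySem.List.pyRange_of_pos 0 (l.length : Int) (by norm_num), List.map_map]
  have hm : (if (0 : Int) < (l.length : Int)
      then (((l.length : Int) - 0 + 2 - 1) / 2).toNat else 0) = (l.length + 1) / 2 := by
    split_ifs with h
    · omega
    · omega
  rw [hm]
  have hfun : ((fun i => PySem.List.slice l (some i) (some (i + 2))) ∘ fun k : Nat => 0 + 2 * (k : Int))
      = (fun k : Nat => (l.drop (2 * k)).take 2) := by
    funext k
    simp only [Function.comp]
    have h1 : (0 : Int) + 2 * (k : Int) = ((2 * k : Nat) : Int) := by push_cast; ring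
    have h2 : ((2 * k : Nat) : Int) + 2 = ((2 * k : Nat) : Int) + ((2 : Nat) : Int) := by
      push_cast; ring
    rw [h1, h2, slice_nn]
  rw [hfun, B_range]

-- ===== VERDICT (by name: the statement is the Claim_ definition above) =====
theorem high_low_spec : Claim_equal_high_low := by
  unfold Claim_equal_high_low Spec_high_low
  intro data _
  unfold high_low high_low_alt
  simp only []
  rw [B_eq]
  set l := data.toList with hl
  have hset : PySem.Int.floordiv ((l.length : Int) + 7) 8 + 1
      = (((l.length + 7) / 8 : Nat) : Int) + 1 := by
    have : PySem.Int.floordiv ((l.length : Int) + 7) 8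
        = Int.fdiv ((l.length : Int) + 7) 8 := rfl
    rw [this, Int.fdiv_eq_ediv, if_pos (Or.inl (by norm_num : (0:Int) ≤ 8))]
    omega
  rw [hset]
  rw [A_loop l ((l.length + 7) / 8)]
  have : l.take (8 * ((l.length + 7) / 8)) = l := List.take_of_length_le (by omega)
  rw [this]
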